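-- pv_equiv track=rewrite | github.com/cesarmanuel8102/AI_Vault | tmp_agent/brain_v9/brain/meta_governance.py | _minimal_action
-- ===== SOURCE A (Python) =====
-- from typing import Any, Dict, List, Tuple
--
-- def _minimal_action(action_rows: List[Dict[str, Any]]) -> str | None:
--     ordered = [
--         "increase_resolved_sample",
--         "run_probation_carefully",
--         "select_and_compare_strategies",
--         "improve_signal_capture_and_context_window",
--         "advance_meta_improvement_roadmap",
--     ]
--     available = {row["action"] for row in action_rows}
--     for action in ordered:
--         if action in available:
--             return action
--     return action_rows[0]["action"] if action_rows else None
-- ===== SOURCE B (Python) =====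
-- def _minimal_action(action_rows):
--     ordered = [
--         "increase_resolved_sample",
--         "run_probation_carefully",
--         "select_and_compare_strategies",
--         "improve_signal_capture_and_context_window",
--         "advance_meta_improvement_roadmap",
--     ]
--     priority = {name: i for i, name in enumerate(ordered)}
--     best_rank = 5
--     best_action = None
--     for row in action_rows:
--         r = priority.get(row["action"], 5)
--         if r < best_rank:
--             best_rank = r
--             best_action = row["action"]
--     if best_action is not None:
--         return best_action
--     return action_rows[0]["action"] if action_rows else None
-- ===== Notes on version B (the rewrite author's own statement) =====
-- stated objective: alternative
-- what changed: B replaces A's 'build a set of available actions, then scan the 5-element priority list' with a single pass over the rows that keeps the minimum priority rank (via a name->rank dict) and its action, falling back to the first row's action.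
import Mathlib
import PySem

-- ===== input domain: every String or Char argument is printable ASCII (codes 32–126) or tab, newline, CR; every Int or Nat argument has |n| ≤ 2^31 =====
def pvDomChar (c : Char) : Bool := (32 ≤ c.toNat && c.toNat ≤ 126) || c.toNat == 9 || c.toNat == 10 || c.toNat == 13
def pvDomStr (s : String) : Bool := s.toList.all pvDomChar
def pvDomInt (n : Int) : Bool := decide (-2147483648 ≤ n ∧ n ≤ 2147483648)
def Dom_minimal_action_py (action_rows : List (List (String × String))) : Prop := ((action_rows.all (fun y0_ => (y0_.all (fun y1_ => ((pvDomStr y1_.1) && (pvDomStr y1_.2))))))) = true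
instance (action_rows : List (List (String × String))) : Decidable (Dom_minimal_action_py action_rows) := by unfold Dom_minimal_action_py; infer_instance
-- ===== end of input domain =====

-- B: one pass over the rows keeping the smallest priority rank, instead of A's
-- available-set plus scan of the ordered priority list (objective: alternative decomposition).

-- the five priority names, shared verbatim by both Pythons
def pvOrdered : List String :=
  ["increase_resolved_sample",
   "run_probation_carefully",
   "select_and_compare_strategies",
   "improve_signal_capture_and_context_window",
   "advance_meta_improvement_roadmap"]

-- row["action"]; total form, used only under Pre_ (key present)
def pvAct (row : List (String × String)) : String :=
  (PySem.Dict.mk row).getD "action" ""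

-- ===== PORT A =====
def minimal_action_py (action_rows : List (List (String × String))) : Option String :=
  let ordered := pvOrdered
  let available : PySem.Set String := PySem.Set.ofList (action_rows.map (fun row => pvAct row))
  -- 'for action in ordered: if action in available: return action'
  match ordered.find? (fun action => PySem.Set.contains available action) with
  | some action => some action
  | none =>
    match action_rows with
    | row :: _ => some (pvAct row)
    | [] => none

-- ===== PORT B =====
def minimal_action_py_alt (action_rows : List (List (String × String))) : Option String :=
  let ordered := pvOrdered
  -- priority = {name: i for i, name in enumerate(ordered)}
  let priority : PySem.Dict String Int :=
    (PySem.List.enumerate ordered).foldl (fun d p => d.insert p.2 p.1) PySem.Dict.empty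
  -- single pass keeping (best_rank, best_action)
  let st : Int × Option String :=
    action_rows.foldl (fun s row =>
      let a := pvAct row
      let r := priority.getD a 5
      if r < s.1 then (r, some a) else s) (5, none)
  match st.2 with
  | some a => some a
  | none =>
    match action_rows with
    | row :: _ => some (pvAct row)
    | [] => none

-- ===== PRECONDITION & SPEC =====
-- Pre_ excludes rows without an "action" key, on which the Python A raises KeyError.
def Pre_minimal_action_py (action_rows : List (List (String × String))) : Prop :=
  ∀ row ∈ action_rows, (PySem.Dict.mk row).contains "action" = true
instance (action_rows : List (List (String × String))) : Decidable (Pre_minimal_action_py action_rows) := by unfold Pre_minimal_action_py; infer_instance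

def pvWitness_minimal_action_py : (List (List (String × String))) :=
  [[("action", "foo")], [("action", "run_probation_carefully")]]

def Spec_minimal_action_py (action_rows : List (List (String × String))) (out : Option String) : Prop := out = minimal_action_py_alt action_rows
instance (action_rows : List (List (String × String))) (out : Option String) : Decidable (Spec_minimal_action_py action_rows out) := by unfold Spec_minimal_action_py; infer_instance

-- ===== CLAIM (what is proved, stated in full; the proofs are below) =====
def Claim_equal_minimal_action_py : Prop := ∀ (action_rows : List (List (String × String))), Dom_minimal_action_py action_rows → Pre_minimal_action_py action_rows → Spec_minimal_action_py action_rows (minimal_action_py action_rows)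

-- ===== LEMMAS AND PROOFS =====

-- rank of an action name in B's priority dict (5 = not a priority name), peel order of the dict
def pvRank (a : String) : Int :=
  if a = "advance_meta_improvement_roadmap" then 4
  else if a = "improve_signal_capture_and_context_window" then 3
  else if a = "select_and_compare_strategies" then 2
  else if a = "run_probation_carefully" then 1
  else if a = "increase_resolved_sample" then 0
  else 5

-- the final state of B's fold, characterised by which priority names occur among the actions
def pvSpecState (acts : List String) : Int × Option String :=
  if "increase_resolved_sample" ∈ acts then (0, some "increase_resolved_sample")
  else if "run_probation_carefully" ∈ acts then (1, some "run_probation_carefully")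
  else if "select_and_compare_strategies" ∈ acts then (2, some "select_and_compare_strategies")
  else if "improve_signal_capture_and_context_window" ∈ acts then (3, some "improve_signal_capture_and_context_window")
  else if "advance_meta_improvement_roadmap" ∈ acts then (4, some "advance_meta_improvement_roadmap")
  else (5, none)

theorem priority_getD (a : String) :
    ((PySem.List.enumerate pvOrdered).foldl (fun d p => d.insert p.2 p.1) PySem.Dict.empty).getD a 5 = pvRank a := by
  simp [pvOrdered, pvRank, PySem.List.enumerate, PySem.Dict.getD_insert, PySem.Dict.getD_empty]

theorem step_spec (p : List String) (a : String) :
    (if pvRank a < (pvSpecState p).1 then (pvRank a, some a) else pvSpecState p) = pvSpecState (p ++ [a]) := by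
  by_cases h0 : a = "increase_resolved_sample"
  · subst h0; simp [pvRank, pvSpecState, List.mem_append]
    split_ifs <;> simp_all
  by_cases h1 : a = "run_probation_carefully"
  · subst h1; simp [pvRank, pvSpecState, List.mem_append]
    split_ifs <;> simp_all
  by_cases h2 : a = "select_and_compare_strategies"
  · subst h2; simp [pvRank, pvSpecState, List.mem_append]
    split_ifs <;> simp_all
  by_cases h3 : a = "improve_signal_capture_and_context_window"
  · subst h3; simp [pvRank, pvSpecState, List.mem_append]
    split_ifs <;> simp_all
  by_cases h4 : a = "advance_meta_improvement_roadmap"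
  · subst h4; simp [pvRank, pvSpecState, List.mem_append]
    split_ifs <;> simp_all
  · simp [pvRank, h0, h1, h2, h3, h4, pvSpecState, List.mem_append, Ne.symm h0, Ne.symm h1, Ne.symm h2, Ne.symm h3, Ne.symm h4]
    split_ifs <;> simp_all

theorem foldB (acts : List String) :
    acts.foldl (fun (s : Int × Option String) a => if pvRank a < s.1 then (pvRank a, some a) else s) (5, none)
      = pvSpecState acts := by
  induction acts using List.reverseRecOn with
  | nil => simp [pvSpecState]
  | append_singleton p a ih => rw [List.foldl_append, List.foldl_cons, List.foldl_nil, ih, step_spec]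

theorem foldB' (rows : List (List (String × String))) :
    rows.foldl (fun (s : Int × Option String) row => if pvRank (pvAct row) < s.1 then (pvRank (pvAct row), some (pvAct row)) else s) (5, none)
      = pvSpecState (rows.map pvAct) := by
  rw [← foldB (rows.map pvAct), List.foldl_map]

theorem contains_ofList (xs : List String) (x : String) :
    PySem.Set.contains (PySem.Set.ofList xs) x = decide (x ∈ xs) := by
  by_cases h : x ∈ xs <;> simp [h, PySem.Set.mem_ofList]

theorem main_equiv (rows : List (List (String × String))) :
    minimal_action_py rows = minimal_action_py_alt rows := by
  unfold minimal_action_py minimal_action_py_alt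
  simp only [priority_getD, contains_ofList]
  rw [foldB']
  simp only [pvOrdered, List.find?]
  by_cases m0 : "increase_resolved_sample" ∈ rows.map pvAct <;>
  by_cases m1 : "run_probation_carefully" ∈ rows.map pvAct <;>
  by_cases m2 : "select_and_compare_strategies" ∈ rows.map pvAct <;>
  by_cases m3 : "improve_signal_capture_and_context_window" ∈ rows.map pvAct <;>
  by_cases m4 : "advance_meta_improvement_roadmap" ∈ rows.map pvAct <;>
    simp [pvSpecState, m0, m1, m2, m3, m4]

-- ===== VERDICT (by name: the statement is the Claim_ definition above) =====
theorem minimal_action_py_spec : Claim_equal_minimal_action_py := by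
  intro rows _ _
  unfold Spec_minimal_action_py
  exact main_equiv rows
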